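-- pv_equiv track=rewrite | github.com/shameekyogi68/scriptpulse-antigravity | scriptpulse/agents/encoding.py | extract_referential_load
-- ===== SOURCE A (Python) =====
-- def extract_referential_load(scene_lines):
--     """
--     Extract referential load (observable character count only).
--
--     Features:
--     - active_character_count: unique characters speaking
--     - character_reintroductions: same character appearing after gap
--     """
--     character_lines = [line for line in scene_lines if line['tag'] == 'C']
--
--     # Unique characters
--     unique_characters = set(line['text'].strip() for line in character_lines)
--     character_count = len(unique_characters)
--
--     # Reintroductions: character appears again after other character spoke
--     reintroductions = 0
--     if len(character_lines) > 1:
--         seen = set()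
--         for char_line in character_lines:
--             char = char_line['text'].strip()
--             if char in seen:
--                 reintroductions += 1
--             seen.add(char)
--
--     return {
--         'active_character_count': character_count,
--         'character_reintroductions': reintroductions
--     }
-- ===== SOURCE B (Python) =====
-- def extract_referential_load(scene_lines):
--     """Same result via a closed form: reintroductions = total C-lines minus distinct names."""
--     names = [line['text'].strip() for line in scene_lines if line['tag'] == 'C']
--     character_count = len(set(names))
--     return {
--         'active_character_count': character_count,
--         'character_reintroductions': len(names) - character_count
--     }
-- ===== Notes on version B (the rewrite author's own statement) =====
-- stated objective: simpler
-- what changed: Replaces the seen-set second pass (and its len>1 guard) with the closed form reintroductions = len(names) - len(set(names)) over a single list of stripped names.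
import Mathlib
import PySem

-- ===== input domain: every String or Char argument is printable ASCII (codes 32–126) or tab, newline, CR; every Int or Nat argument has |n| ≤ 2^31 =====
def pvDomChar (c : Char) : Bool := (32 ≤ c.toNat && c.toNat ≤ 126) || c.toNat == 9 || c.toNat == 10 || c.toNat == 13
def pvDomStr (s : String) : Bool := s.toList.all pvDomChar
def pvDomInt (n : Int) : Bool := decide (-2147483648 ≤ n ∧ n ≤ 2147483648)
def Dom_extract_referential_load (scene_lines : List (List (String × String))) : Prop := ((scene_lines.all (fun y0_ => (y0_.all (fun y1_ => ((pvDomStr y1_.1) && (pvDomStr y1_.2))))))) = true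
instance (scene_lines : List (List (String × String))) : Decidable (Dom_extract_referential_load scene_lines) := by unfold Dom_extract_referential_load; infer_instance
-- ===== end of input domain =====

-- B replaces A's seen-set second pass with the closed form: reintroductions = number of C-lines minus distinct stripped names (simpler decomposition, same O(n) cost).


-- ===== PORT A =====
-- A's loop state: (seen set, reintroduction count)
def pvAStep (st : PySem.Set String × Int) (line : List (String × String)) : PySem.Set String × Int :=
  let ch := PySem.Str.strip ((PySem.Dict.mk line).getD "text" "")
  (if st.1.contains ch then (st.1, st.2 + 1) else (st.1.add ch, st.2))

def extract_referential_load (scene_lines : List (List (String × String))) : List (String × Int) :=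
  let character_lines := scene_lines.filter (fun line => (PySem.Dict.mk line).get? "tag" == some "C")
  let unique_characters : PySem.Set String :=
    PySem.Set.ofList (character_lines.map (fun line => PySem.Str.strip ((PySem.Dict.mk line).getD "text" "")))
  let character_count : Int := unique_characters.length
  let reintroductions : Int :=
    if character_lines.length > 1 then
      (character_lines.foldl pvAStep (PySem.Set.empty, 0)).2
    else 0
  [("active_character_count", character_count), ("character_reintroductions", reintroductions)]

-- ===== PORT B =====
def extract_referential_load_alt (scene_lines : List (List (String × String))) : List (String × Int) :=
  let names := (scene_lines.filter (fun line => (PySem.Dict.mk line).get? "tag" == some "C")).map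
    (fun line => PySem.Str.strip ((PySem.Dict.mk line).getD "text" ""))
  let character_count : Int := (PySem.Set.ofList names).length
  [("active_character_count", character_count),
   ("character_reintroductions", (names.length : Int) - character_count)]

-- ===== PRECONDITION & SPEC =====
-- Pre_ excludes inputs where Python A raises KeyError: a line without a 'tag' key, or a 'C'-tagged line without a 'text' key.
def Pre_extract_referential_load (scene_lines : List (List (String × String))) : Prop :=
  (scene_lines.all (fun line =>
    (PySem.Dict.mk line).contains "tag" &&
    (!((PySem.Dict.mk line).get? "tag" == some "C") || (PySem.Dict.mk line).contains "text"))) = true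
instance (scene_lines : List (List (String × String))) : Decidable (Pre_extract_referential_load scene_lines) := by
  unfold Pre_extract_referential_load; infer_instance

def pvWitness_extract_referential_load : (List (List (String × String))) :=
  [[("tag", "C"), ("text", " Bob ")], [("tag", "D"), ("text", "hello")]]

def Spec_extract_referential_load (scene_lines : List (List (String × String))) (out : List (String × Int)) : Prop := out = extract_referential_load_alt scene_lines
instance (scene_lines : List (List (String × String))) (out : List (String × Int)) : Decidable (Spec_extract_referential_load scene_lines out) := by unfold Spec_extract_referential_load; infer_instance

-- ===== CLAIM (what is proved, stated in full; the proofs are below) =====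
def Claim_equal_extract_referential_load : Prop := ∀ (scene_lines : List (List (String × String))), Dom_extract_referential_load scene_lines → Pre_extract_referential_load scene_lines → Spec_extract_referential_load scene_lines (extract_referential_load scene_lines)

-- ===== LEMMAS AND PROOFS =====

-- A's seen-set loop counts total minus distinct: invariant over any start state.
theorem pvAStep_invariant (names : List (List (String × String))) (s : PySem.Set String) (r : Int) :
    (names.foldl pvAStep (s, r)).1 =
      PySem.Set.update s (names.map (fun line => PySem.Str.strip ((PySem.Dict.mk line).getD "text" ""))) ∧
    (names.foldl pvAStep (s, r)).2 +
      ((PySem.Set.update s (names.map (fun line => PySem.Str.strip ((PySem.Dict.mk line).getD "text" "")))).length : Int)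
      = r + names.length + s.length := by
  induction names generalizing s r with
  | nil => simp [PySem.Set.update]
  | cons line rest ih =>
    simp only [List.foldl_cons, List.map_cons, List.length_cons]
    by_cases h : s.contains (PySem.Str.strip ((PySem.Dict.mk line).getD "text" "")) = true
    · have hadd : PySem.Set.add s (PySem.Str.strip ((PySem.Dict.mk line).getD "text" "")) = s := by
        simp [PySem.Set.add]; exact (PySem.Set.contains_iff _ _).mp h
      have : PySem.Set.update s
          ((PySem.Str.strip ((PySem.Dict.mk line).getD "text" "")) ::
            rest.map (fun line => PySem.Str.strip ((PySem.Dict.mk line).getD "text" ""))) =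
          PySem.Set.update s (rest.map (fun line => PySem.Str.strip ((PySem.Dict.mk line).getD "text" ""))) := by
        simp [PySem.Set.update, hadd]
      rw [this]
      have step : pvAStep (s, r) line = (s, r + 1) := by
        simp [pvAStep]; exact (PySem.Set.contains_iff _ _).mp h
      rw [step]
      obtain ⟨h1, h2⟩ := ih s (r + 1)
      exact ⟨h1, by rw [h2]; push_cast; ring⟩
    · have hadd : PySem.Set.add s (PySem.Str.strip ((PySem.Dict.mk line).getD "text" "")) =
          s ++ [PySem.Str.strip ((PySem.Dict.mk line).getD "text" "")] :=
        PySem.Set.add_of_not_mem (fun hm => h ((PySem.Set.contains_iff s _).mpr hm))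
      have step : pvAStep (s, r) line =
          (PySem.Set.add s (PySem.Str.strip ((PySem.Dict.mk line).getD "text" "")), r) := by
        simp [pvAStep]; exact fun hm => h ((PySem.Set.contains_iff _ _).mpr hm)
      rw [step]
      have hupd : PySem.Set.update s
          ((PySem.Str.strip ((PySem.Dict.mk line).getD "text" "")) ::
            rest.map (fun line => PySem.Str.strip ((PySem.Dict.mk line).getD "text" ""))) =
          PySem.Set.update (PySem.Set.add s (PySem.Str.strip ((PySem.Dict.mk line).getD "text" "")))
            (rest.map (fun line => PySem.Str.strip ((PySem.Dict.mk line).getD "text" ""))) := by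
        simp [PySem.Set.update]
      rw [hupd]
      obtain ⟨h1, h2⟩ := ih (PySem.Set.add s (PySem.Str.strip ((PySem.Dict.mk line).getD "text" ""))) r
      refine ⟨h1, ?_⟩
      rw [h2, hadd]
      simp [List.length_append]
      ring

-- ofList is update of the empty set (both are foldl add).
theorem pvOfList_eq_update_empty (xs : List String) :
    PySem.Set.ofList xs = PySem.Set.update PySem.Set.empty xs := by
  simp [PySem.Set.ofList_eq_foldl, PySem.Set.update, PySem.Set.empty]

-- the loop starting from empty computes length − distinct
theorem pvLoop_closed_form (cl : List (List (String × String))) :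
    (cl.foldl pvAStep (PySem.Set.empty, 0)).2 =
      (cl.length : Int) -
        ((PySem.Set.ofList (cl.map (fun line => PySem.Str.strip ((PySem.Dict.mk line).getD "text" "")))).length : Int) := by
  obtain ⟨-, h2⟩ := pvAStep_invariant cl PySem.Set.empty 0
  rw [pvOfList_eq_update_empty]
  simp only [PySem.Set.empty, List.length_nil] at h2 ⊢
  omega

-- ===== VERDICT (by name: the statement is the Claim_ definition above) =====
theorem extract_referential_load_spec : Claim_equal_extract_referential_load := by
  intro scene_lines _ _
  unfold Spec_extract_referential_load extract_referential_load extract_referential_load_alt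
  simp only []
  set cl := scene_lines.filter (fun line => (PySem.Dict.mk line).get? "tag" == some "C") with hcl
  by_cases h : cl.length > 1
  · simp only [if_pos h, pvLoop_closed_form cl, List.length_map]
  · -- 0 or 1 filtered lines: both sides give 0 reintroductions
    interval_cases hlen : cl.length
    all_goals simp only [if_neg h]
    · have : cl = [] := List.length_eq_zero_iff.mp hlen
      simp [this]
    · obtain ⟨x, hx⟩ := List.length_eq_one_iff.mp hlen
      simp [hx, PySem.Set.ofList, PySem.Set.add, PySem.Set.contains, PySem.Set.empty]
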